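-- pv_equiv track=rewrite | github.com/Bumbi54/Advent20 | Day11/Day11.py | parseInputFile
-- ===== SOURCE A (Python) =====
-- def parseInputFile(fileContent):
--     """
--     Parse input file into set mapping.
--     """
--
--     seatsMaping = set()
--     x = 0
--     y = 0
--     for line in fileContent:
--         for location in line:
--             if location == "L":
--                 seatsMaping.add((x, y))
--
--             if location == "\n":
--                 y = 0
--                 x += 1
--             else:
--                 y += 1
--
--     return seatsMaping, x + 1, y
-- ===== SOURCE B (Python) =====
-- def parseInputFile(fileContent):
--     """
--     Parse input file into set mapping, by joining the chunks and splitting on newlines.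
--     """
--     text = "".join(fileContent)
--     segments = text.split("\n")
--     seats = {(i, j)
--              for i, seg in enumerate(segments)
--              for j, c in enumerate(seg)
--              if c == 'L'}
--     return seats, len(segments), len(segments[-1])
-- ===== Notes on version B (the rewrite author's own statement) =====
-- stated objective: idiomatic
-- what changed: A scans character by character with a running (x, y) cursor that newlines reset; B joins the chunks into one text, splits it on ' ' and builds the seat set with a nested-enumerate comprehension over the segments, returning len(segments) and len(segments[-1]) for the counters.
import Mathlib
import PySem

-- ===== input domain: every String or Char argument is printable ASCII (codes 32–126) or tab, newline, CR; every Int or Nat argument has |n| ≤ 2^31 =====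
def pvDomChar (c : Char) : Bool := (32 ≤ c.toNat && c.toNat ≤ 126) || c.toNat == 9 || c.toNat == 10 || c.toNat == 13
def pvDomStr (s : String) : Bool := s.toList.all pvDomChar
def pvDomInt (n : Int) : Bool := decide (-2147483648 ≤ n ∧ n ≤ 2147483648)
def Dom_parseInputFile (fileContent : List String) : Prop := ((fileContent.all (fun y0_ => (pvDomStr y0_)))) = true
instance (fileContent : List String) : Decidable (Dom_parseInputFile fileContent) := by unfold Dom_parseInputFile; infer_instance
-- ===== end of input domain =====

-- B joins the chunks into one text, splits it on '\n' and reads the seats off with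
-- nested enumeration instead of A's single character-by-character coordinate machine
-- (objective: idiomatic; same cost).

-- ===== PORT A =====
-- the body of A's inner loop: check 'L', then advance the (x, y) cursor
def pvStepA (st : List (Int × Int) × Int × Int) (location : Char) : List (Int × Int) × Int × Int :=
  let s' := if location == 'L' then PySem.Set.add st.1 (st.2.1, st.2.2) else st.1
  if location == '\n' then (s', st.2.1 + 1, 0) else (s', st.2.1, st.2.2 + 1)

def parseInputFile (fileContent : List String) : (List (Int × Int)) × Int × Int :=
  -- for line in fileContent: for location in line: …
  let r := fileContent.foldl (fun st line => line.toList.foldl pvStepA st)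
    (([] : List (Int × Int)), (0 : Int), (0 : Int))
  (r.1, r.2.1 + 1, r.2.2)

-- ===== PORT B =====
def parseInputFile_alt (fileContent : List String) : (List (Int × Int)) × Int × Int :=
  -- text = "".join(fileContent)
  let text : List Char := PySem.Chars.join [] (fileContent.map String.toList)
  -- segments = text.split("\n")
  let segments := PySem.Chars.splitOn text ['\n']
  -- {(i, j) for i, seg in enumerate(segments) for j, c in enumerate(seg) if c == 'L'}
  let seats := PySem.Set.ofList ((PySem.List.enumerate segments).flatMap (fun p =>
    (PySem.List.enumerate p.2).filterMap (fun q =>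
      if q.2 == 'L' then some (p.1, q.1) else none)))
  -- segments[-1]; str.split always returns a nonempty list, so the getD default is unreachable
  (seats, (segments.length : Int), (((PySem.List.pyGet? segments (-1)).getD []).length : Int))

-- ===== PRECONDITION & SPEC =====
def Spec_parseInputFile (fileContent : List String) (out : (List (Int × Int)) × Int × Int) : Prop := out = parseInputFile_alt fileContent
instance (fileContent : List String) (out : (List (Int × Int)) × Int × Int) : Decidable (Spec_parseInputFile fileContent out) := by unfold Spec_parseInputFile; infer_instance

-- ===== CLAIM (what is proved, stated in full; the proofs are below) =====
def Claim_equal_parseInputFile : Prop := ∀ (fileContent : List String), Dom_parseInputFile fileContent → Spec_parseInputFile fileContent (parseInputFile fileContent)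

-- ===== LEMMAS AND PROOFS =====

-- recursive characterisation of text.split("\n") on char lists
def pvSplitNl : List Char → List (List Char)
  | [] => [[]]
  | c :: cs =>
    if c = '\n' then [] :: pvSplitNl cs
    else
      match pvSplitNl cs with
      | [] => [[c]]
      | h :: t => (c :: h) :: t

-- the seats A emits while scanning the rows `segs` starting at row x, first row at column y
def pvRow : List Char → Int → Int → List (Int × Int)
  | [], _, _ => []
  | c :: rest, x, y => (if c == 'L' then [(x, y)] else []) ++ pvRow rest x (y + 1)

def pvEmit : List (List Char) → Int → Int → List (Int × Int)
  | [], _, _ => []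
  | seg :: rest, x, y => pvRow seg x y ++ pvEmit rest (x + 1) 0

-- A's final column counter, given the segments and the incoming y
def pvLastY : List (List Char) → Int → Int
  | [], y => y
  | [seg], y => y + seg.length
  | _ :: seg :: rest, _ => pvLastY (seg :: rest) 0

theorem pvSplitNl_ne_nil (cs : List Char) : pvSplitNl cs ≠ [] := by
  induction cs with
  | nil => simp [pvSplitNl]
  | cons c cs ih =>
    simp only [pvSplitNl]
    split
    · simp
    · cases h : pvSplitNl cs <;> simp

-- PySem.Chars.splitOn on separator "\n" is pvSplitNl
theorem pvSplitOn_go (cs : List Char) : ∀ (fuel : Nat) (cur : List Char) (acc : List (List Char)),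
    cs.length < fuel →
    PySem.Chars.splitOn.go ['\n'] fuel cs cur acc =
      acc.reverse ++ (match pvSplitNl cs with
        | [] => [cur.reverse]
        | h :: t => (cur.reverse ++ h) :: t) := by
  induction cs with
  | nil =>
    intro fuel cur acc hf
    match fuel, hf with
    | fuel + 1, _ => simp [PySem.Chars.splitOn.go, pvSplitNl]
  | cons c cs ih =>
    intro fuel cur acc hf
    match fuel, hf with
    | fuel + 1, hf =>
      by_cases hc : c = '\n'
      · subst hc
        have hpre : List.isPrefixOf ['\n'] ('\n' :: cs) = true := by
          simp [List.isPrefixOf]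
        rw [PySem.Chars.splitOn.go, if_pos hpre]
        simp only [List.length_cons] at hf
        have hdrop : List.drop ['\n'].length ('\n' :: cs) = cs := rfl
        rw [hdrop, ih fuel [] (cur.reverse :: acc) (by omega)]
        cases h : pvSplitNl cs with
        | nil => exact absurd h (pvSplitNl_ne_nil cs)
        | cons h t => simp [pvSplitNl, h]
      · have hpre : List.isPrefixOf ['\n'] (c :: cs) = false := by
          simp only [List.isPrefixOf, Bool.and_true, beq_eq_false_iff_ne, ne_eq]
          exact fun h => hc h.symm
        rw [PySem.Chars.splitOn.go, if_neg (by simp [hpre])]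
        simp only [List.length_cons] at hf
        rw [ih fuel (c :: cur) acc (by omega)]
        cases h : pvSplitNl cs with
        | nil => exact absurd h (pvSplitNl_ne_nil cs)
        | cons h t => simp [pvSplitNl, hc, h]

theorem pvSplitOn_eq (cs : List Char) : PySem.Chars.splitOn cs ['\n'] = pvSplitNl cs := by
  unfold PySem.Chars.splitOn
  rw [pvSplitOn_go cs (cs.length + 1) [] [] (by omega)]
  cases h : pvSplitNl cs with
  | nil => exact absurd h (pvSplitNl_ne_nil cs)
  | cons h t => simp

-- the loop invariant: folding A's step over a character stream, described by the split
theorem pvKey (cs : List Char) : ∀ (s : List (Int × Int)) (x y : Int),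
    cs.foldl pvStepA (s, x, y) =
      (List.foldl PySem.Set.add s (pvEmit (pvSplitNl cs) x y),
       x + ((pvSplitNl cs).length : Int) - 1,
       pvLastY (pvSplitNl cs) y) := by
  induction cs with
  | nil =>
    intro s x y
    simp [pvSplitNl, pvEmit, pvRow, pvLastY]
  | cons c cs ih =>
    intro s x y
    by_cases hc : c = '\n'
    · subst hc
      have hstep : pvStepA (s, x, y) '\n' = (s, x + 1, 0) := by
        simp [pvStepA]
      rw [List.foldl_cons, hstep, ih s (x + 1) 0]
      cases h : pvSplitNl cs with
      | nil => exact absurd h (pvSplitNl_ne_nil cs)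
      | cons hseg t =>
        simp only [pvSplitNl, h]
        refine Prod.ext ?_ (Prod.ext ?_ ?_)
        · simp [pvEmit, pvRow]
        · push_cast [List.length_cons]
          ring
        · rfl

    · have hstep : pvStepA (s, x, y) c =
          ((if c == 'L' then PySem.Set.add s (x, y) else s), x, y + 1) := by
        simp [pvStepA, hc]
      rw [List.foldl_cons, hstep, ih _ x (y + 1)]
      cases h : pvSplitNl cs with
      | nil => exact absurd h (pvSplitNl_ne_nil cs)
      | cons hseg t =>
        simp only [pvSplitNl, if_neg hc, h]
        refine Prod.ext ?_ (Prod.ext ?_ ?_)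
        · have hs : ∀ rest, List.foldl PySem.Set.add s
              ((if (c == 'L') = true then [(x, y)] else []) ++ rest) =
              List.foldl PySem.Set.add (if (c == 'L') = true then PySem.Set.add s (x, y) else s) rest := by
            intro rest; split <;> rfl
          simp only [pvEmit, pvRow, List.append_assoc, hs]
        · rfl
        · cases t with
          | nil =>
            simp only [pvLastY, List.length_cons]
            push_cast
            ring
          | cons t0 t1 => rfl

-- a row of B's comprehension is pvRow
theorem pvRow_eq (seg : List Char) (x : Int) : ∀ (y : Int),
    (PySem.List.enumerate seg y).filterMap (fun q =>
        if q.2 == 'L' then some (x, q.1) else none) = pvRow seg x y := by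
  induction seg with
  | nil => intro y; simp [PySem.List.enumerate_nil, pvRow]
  | cons c rest ih =>
    intro y
    rw [PySem.List.enumerate_cons, List.filterMap_cons]
    cases hcL : (c == 'L') <;>
      (simp only [pvRow, hcL]; simpa using ih (y + 1))

-- B's full comprehension is pvEmit at column 0
theorem pvEmit_eq (segs : List (List Char)) : ∀ (x : Int),
    (PySem.List.enumerate segs x).flatMap (fun p =>
        (PySem.List.enumerate p.2).filterMap (fun q =>
          if q.2 == 'L' then some (p.1, q.1) else none)) = pvEmit segs x 0 := by
  induction segs with
  | nil => intro x; simp [PySem.List.enumerate_nil, pvEmit]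
  | cons seg rest ih =>
    intro x
    rw [PySem.List.enumerate_cons, List.flatMap_cons, ih (x + 1)]
    simp only [pvEmit]
    congr 1
    simpa using pvRow_eq seg x 0

-- Python's segments[-1] on a nonempty list is its last element
theorem pvGet_neg_one {α : Type} (l : List α) (hne : l ≠ []) :
    PySem.List.pyGet? l (-1) = some (l.getLast hne) := by
  have hlen : 1 ≤ l.length := List.length_pos_iff.mpr hne
  simp only [PySem.List.pyGet?, PySem.List.pyIdx?]
  rw [if_neg (by omega), if_pos (by omega)]
  have h1 : l.length - ((-(-1 : Int)).toNat) = l.length - 1 := rfl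
  simp only [h1, Option.bind]
  rw [List.getElem?_eq_getElem (by omega), List.getLast_eq_getElem]

-- the final y A reports is the length of the last segment
theorem pvLastY_eq (segs : List (List Char)) : ∀ (hne : segs ≠ []),
    pvLastY segs 0 = ((segs.getLast hne).length : Int) := by
  induction segs with
  | nil => intro hne; exact absurd rfl hne
  | cons seg rest ih =>
    intro hne
    cases rest with
    | nil => simp [pvLastY]
    | cons r0 r1 =>
      rw [List.getLast_cons (by simp)]
      exact ih (by simp)

-- "".join(parts) is concatenation
theorem pvJoin_nil (l : List (List Char)) : PySem.Chars.join [] l = l.flatten := by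
  induction l with
  | nil => rfl
  | cons h t ih =>
    cases t with
    | nil => simp [PySem.Chars.join, List.intercalate]
    | cons t0 t1 =>
      simp only [PySem.Chars.join, List.intercalate] at ih ⊢
      simp_all [List.intersperse]

-- ===== VERDICT (by name: the statement is the Claim_ definition above) =====
theorem parseInputFile_spec : Claim_equal_parseInputFile := by
  intro fileContent _
  unfold Spec_parseInputFile
  simp only [parseInputFile, parseInputFile_alt, pvJoin_nil, pvSplitOn_eq]
  have houter : fileContent.foldl (fun st line => line.toList.foldl pvStepA st)
      (([] : List (Int × Int)), (0 : Int), (0 : Int)) =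
      ((fileContent.map String.toList).flatten).foldl pvStepA
        (([] : List (Int × Int)), (0 : Int), (0 : Int)) := by
    rw [List.foldl_flatten, List.foldl_map]
  rw [houter, pvKey]
  have hne := pvSplitNl_ne_nil ((fileContent.map String.toList).flatten)
  refine Prod.ext ?_ (Prod.ext ?_ ?_)
  · rw [PySem.Set.ofList_eq_foldl, pvEmit_eq]
  · simp only []
    omega
  · simp only []
    rw [pvGet_neg_one _ hne, Option.getD_some, pvLastY_eq _ hne]
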